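-- pv_equiv track=rewrite | github.com/yktsubo/pynsxt | pynsxt/pynsxt_utils.py | add_or_update_tag
-- ===== SOURCE A (Python) =====
-- def add_or_update_tag(obj, tag):
--     if not obj['tags']:
--         obj['tags'] = []
--     matched_tag = [t for t in obj['tags'] if t['scope'] == tag['scope']]
--     if len(matched_tag) == 0:
--         obj['tags'].append(tag)
--     else:
--         for t in obj['tags']:
--             if t['scope'] == tag['scope']:
--                 t['tag'] = tag['tag']
--     return obj
-- ===== SOURCE B (Python) =====
-- def add_or_update_tag(obj, tag):
--     tags = obj['tags'] or []
--     new_tags = [{**t, 'tag': tag['tag']} if t['scope'] == tag['scope'] else t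
--                 for t in tags]
--     if all(t['scope'] != tag['scope'] for t in tags):
--         new_tags.append(tag)
--     obj['tags'] = new_tags
--     return obj
-- ===== Notes on version B (the rewrite author's own statement) =====
-- stated objective: simpler
-- what changed: A's detect-then-mutate two-pass (a matching comprehension, then either an append or a second loop mutating each matching tag dict in place) is replaced by a functional rebuild: one comprehension produces the updated tags list ({**t,'tag':...} for matching scopes) and the tag is appended only when no scope matched; the new list is assigned back to obj['tags'].
import Mathlib
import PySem

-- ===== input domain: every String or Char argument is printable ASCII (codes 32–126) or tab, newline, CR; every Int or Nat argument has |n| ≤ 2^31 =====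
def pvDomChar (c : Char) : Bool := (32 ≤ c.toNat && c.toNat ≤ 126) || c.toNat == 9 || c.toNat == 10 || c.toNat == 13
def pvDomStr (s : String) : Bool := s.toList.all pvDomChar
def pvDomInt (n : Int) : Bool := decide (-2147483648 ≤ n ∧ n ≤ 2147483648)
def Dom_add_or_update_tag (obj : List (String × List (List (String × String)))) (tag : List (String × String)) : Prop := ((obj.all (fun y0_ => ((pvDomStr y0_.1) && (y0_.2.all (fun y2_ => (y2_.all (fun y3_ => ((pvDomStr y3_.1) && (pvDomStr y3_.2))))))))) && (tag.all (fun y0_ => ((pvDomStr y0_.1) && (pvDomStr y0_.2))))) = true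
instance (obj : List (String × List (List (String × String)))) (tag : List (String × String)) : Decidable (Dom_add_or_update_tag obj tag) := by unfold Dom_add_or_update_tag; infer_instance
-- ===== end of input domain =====

-- B replaces A's detect-then-mutate two-pass with a functional rebuild of the tags list (simpler).
-- Python A mutates obj (and its inner tag dicts) in place while B assigns a freshly built list to
-- obj['tags']; the equivalence proved here is about the RETURN value only.

-- ===== PORT A =====
-- A's in-place loop "for t in obj['tags']: if match: t['tag'] = tag['tag']" is rendered as the
-- map it performs on the value of the list.
def add_or_update_tag (obj : List (String × List (List (String × String)))) (tag : List (String × String)) : List (String × List (List (String × String))) :=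
  let d0 := PySem.Dict.mk obj
  let d1 := if d0.getD "tags" [] = [] then d0.insert "tags" [] else d0
  let tags := d1.getD "tags" []
  let matched := tags.filter (fun t => (PySem.Dict.mk t).get? "scope" == (PySem.Dict.mk tag).get? "scope")
  if matched.length = 0 then
    (d1.insert "tags" (tags ++ [tag])).items
  else
    (d1.insert "tags" (tags.map (fun t =>
      if (PySem.Dict.mk t).get? "scope" == (PySem.Dict.mk tag).get? "scope"
      then ((PySem.Dict.mk t).insert "tag" ((PySem.Dict.mk tag).getD "tag" "")).items
      else t))).items

-- ===== PORT B =====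
def add_or_update_tag_alt (obj : List (String × List (List (String × String)))) (tag : List (String × String)) : List (String × List (List (String × String))) :=
  let tags := (PySem.Dict.mk obj).getD "tags" []
  let newTags := tags.map (fun t =>
    if (PySem.Dict.mk t).get? "scope" == (PySem.Dict.mk tag).get? "scope"
    then ((PySem.Dict.mk t).insert "tag" ((PySem.Dict.mk tag).getD "tag" "")).items
    else t)
  let newTags' := if tags.all (fun t => !((PySem.Dict.mk t).get? "scope" == (PySem.Dict.mk tag).get? "scope"))
    then newTags ++ [tag] else newTags
  ((PySem.Dict.mk obj).insert "tags" newTags').items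

-- ===== PRECONDITION & SPEC =====
-- Pre_ excludes exactly the inputs where Python A raises KeyError: a missing 'tags' key in obj, a
-- missing 'scope' key in tag (when the tags list is non-empty) or in some listed tag dict, and a
-- missing 'tag' key in tag when some listed tag dict matches its scope.
def Pre_add_or_update_tag (obj : List (String × List (List (String × String)))) (tag : List (String × String)) : Prop :=
  ((PySem.Dict.mk obj).get? "tags").isSome = true ∧
  ((PySem.Dict.mk obj).getD "tags" [] ≠ [] → ((PySem.Dict.mk tag).get? "scope").isSome = true) ∧
  (∀ t ∈ (PySem.Dict.mk obj).getD "tags" [], ((PySem.Dict.mk t).get? "scope").isSome = true) ∧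
  ((∃ t ∈ (PySem.Dict.mk obj).getD "tags" [],
      (PySem.Dict.mk t).get? "scope" = (PySem.Dict.mk tag).get? "scope") →
    ((PySem.Dict.mk tag).get? "tag").isSome = true)
instance (obj : List (String × List (List (String × String)))) (tag : List (String × String)) : Decidable (Pre_add_or_update_tag obj tag) := by unfold Pre_add_or_update_tag; infer_instance
def pvWitness_add_or_update_tag : (List (String × List (List (String × String)))) × (List (String × String)) :=
  ([("tags", [[("scope", "a"), ("tag", "b")]])], [("scope", "a"), ("tag", "c")])

def Spec_add_or_update_tag (obj : List (String × List (List (String × String)))) (tag : List (String × String)) (out : List (String × List (List (String × String)))) : Prop := out = add_or_update_tag_alt obj tag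
instance (obj : List (String × List (List (String × String)))) (tag : List (String × String)) (out : List (String × List (List (String × String)))) : Decidable (Spec_add_or_update_tag obj tag out) := by unfold Spec_add_or_update_tag; infer_instance

-- ===== CLAIM (what is proved, stated in full; the proofs are below) =====
def Claim_equal_add_or_update_tag : Prop := ∀ (obj : List (String × List (List (String × String)))) (tag : List (String × String)), Dom_add_or_update_tag obj tag → Pre_add_or_update_tag obj tag → Spec_add_or_update_tag obj tag (add_or_update_tag obj tag)

-- ===== LEMMAS AND PROOFS =====

-- a map that never fires its condition is the identity
theorem pv_map_if_id {α : Type} (p : α → Bool) (f : α → α) (l : List α)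
    (h : ∀ t ∈ l, p t = false) :
    l.map (fun t => if p t then f t else t) = l := by
  induction l with
  | nil => rfl
  | cons a l ih =>
    rw [List.map_cons, if_neg (by simp [h a List.mem_cons_self]),
      ih (fun t ht => h t (List.mem_cons_of_mem a ht))]

-- the two ports agree on EVERY input (Pre_ only delimits where Python A returns)
theorem pv_ports_agree (obj : List (String × List (List (String × String))))
    (tag : List (String × String)) :
    add_or_update_tag obj tag = add_or_update_tag_alt obj tag := by
  unfold add_or_update_tag add_or_update_tag_alt
  set d0 := PySem.Dict.mk obj with hd0
  set c : List (String × String) → Bool :=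
    fun t => (PySem.Dict.mk t).get? "scope" == (PySem.Dict.mk tag).get? "scope" with hc
  by_cases hemp : d0.getD "tags" [] = []
  · -- empty (or falsy) tags list: A inserts [] then appends; B inserts [tag] directly
    simp only [hemp, PySem.Dict.getD_insert_self, List.filter_nil, List.length_nil,
      List.nil_append, List.map_nil, List.all_nil, if_true, PySem.Dict.insert_insert_self]
  · simp only [if_neg hemp]
    set tags := d0.getD "tags" [] with htags
    by_cases hall : tags.all (fun t => !(c t)) = true
    · -- no matching scope: B's map is the identity, both append tag
      have hno : ∀ t ∈ tags, c t = false := by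
        intro t ht
        simpa using (List.all_eq_true.mp hall) t ht
      have hfil : (tags.filter c).length = 0 := by
        rw [List.filter_eq_nil_iff.mpr (by intro t ht; simp [hno t ht])]
        rfl
      rw [pv_map_if_id c _ tags hno, if_pos hfil, if_pos hall]
    · -- some scope matches: both map, neither appends
      have hx : ∃ t ∈ tags, c t = true := by
        by_contra hcon
        exact hall (List.all_eq_true.mpr (fun t ht => by
          rcases Bool.eq_false_or_eq_true (c t) with hct | hcf
          · exact absurd ⟨t, ht, hct⟩ hcon
          · simp [hcf]))
      obtain ⟨t, ht, hct⟩ := hx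
      have hlen : ¬ (tags.filter c).length = 0 := by
        intro h
        have := List.filter_eq_nil_iff.mp (List.length_eq_zero_iff.mp h) t ht
        simp [hct] at this
      rw [if_neg hlen, if_neg hall]
-- ===== VERDICT (by name: the statement is the Claim_ definition above) =====
theorem add_or_update_tag_spec : Claim_equal_add_or_update_tag := by
  intro obj tag _ _
  unfold Spec_add_or_update_tag
  exact pv_ports_agree obj tag
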